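-- pv_equiv track=rewrite | github.com/alex-lc/cs-sprint-challenge-hash-tables | hashtables/ex5/ex5.py | finder
-- ===== SOURCE A (Python) =====
-- def finder(files, queries):
--     # cache for our paths
--     paths = {}
--     result = []
--
--     # iterate over our files and add to our cache
--     for path in files:
--         # split up path and grab just the filename
--         name = path.split('/')[-1]
--
--         # if our filename is not yet in our cache, add it
--         if name not in paths:
--             paths[name] = []
--
--         # append full path as value to key of filename
--         paths[name].append(path)
--
--     # iterate over our list of queries and extend our result list if
--     # our query is in our paths cache
--     for query in queries:
--         if query in paths:
--             result.extend(paths[query])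
--
--     return result
-- ===== SOURCE B (Python) =====
-- def finder(files, queries):
--     # Direct approach, no dict index: pair each path with its basename once,
--     # then for each query take the matching paths in file order.
--     named = [(path.split('/')[-1], path) for path in files]
--     return [path for query in queries for name, path in named if name == query]
-- ===== Notes on version B (the rewrite author's own statement) =====
-- stated objective: simpler
-- what changed: Replaced the dict index (group files by basename, then look up each query) with a direct approach: pair each path with its basename once, then a flat comprehension over queries picks the matching paths in file order.
import Mathlib
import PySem

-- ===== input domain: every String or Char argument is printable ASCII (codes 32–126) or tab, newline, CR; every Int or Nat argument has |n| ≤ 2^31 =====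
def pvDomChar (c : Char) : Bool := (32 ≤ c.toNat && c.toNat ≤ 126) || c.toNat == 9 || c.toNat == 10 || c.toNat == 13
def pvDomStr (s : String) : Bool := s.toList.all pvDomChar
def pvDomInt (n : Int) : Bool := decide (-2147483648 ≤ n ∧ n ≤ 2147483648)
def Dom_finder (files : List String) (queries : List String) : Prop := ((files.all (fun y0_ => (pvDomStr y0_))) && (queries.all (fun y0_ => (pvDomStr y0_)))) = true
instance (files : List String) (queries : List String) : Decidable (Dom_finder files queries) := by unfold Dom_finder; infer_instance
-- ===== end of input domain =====

-- B replaces A's dict index (group files by basename, then look up each query) with a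
-- flat comprehension over queries and files (basenames paired once); same output, simpler decomposition.


-- ===== PORT A =====
-- path.split('/')[-1]: split? with nonempty sep "/" is always `some` of a nonempty list,
-- so both `.getD` defaults are dead code; exact for every string.
def pvName (p : String) : String :=
  (PySem.List.pyGet? ((PySem.Str.split? p "/").getD []) (-1)).getD ""

def finder (files : List String) (queries : List String) : List String :=
  -- cache for our paths; first loop groups files by basename
  let paths : PySem.Dict String (List String) :=
    files.foldl (fun d path =>
      let name := pvName path
      let d := if d.contains name then d else d.insert name ([] : List String)
      d.modify name [] (· ++ [path])) PySem.Dict.empty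
  -- second loop: extend result for each query present in the cache
  queries.foldl (fun result query =>
    if paths.contains query then result ++ paths.getD query [] else result) []

-- ===== PORT B =====
def finder_alt (files : List String) (queries : List String) : List String :=
  let named := files.map (fun path => (pvName path, path))
  queries.flatMap (fun query => (named.filter (fun np => np.1 == query)).map (fun np => np.2))

-- ===== PRECONDITION & SPEC =====
def Spec_finder (files : List String) (queries : List String) (out : List String) : Prop := out = finder_alt files queries
instance (files : List String) (queries : List String) (out : List String) : Decidable (Spec_finder files queries out) := by unfold Spec_finder; infer_instance

-- ===== CLAIM (what is proved, stated in full; the proofs are below) =====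
def Claim_equal_finder : Prop := ∀ (files : List String) (queries : List String), Dom_finder files queries → Spec_finder files queries (finder files queries)

-- ===== LEMMAS AND PROOFS =====

-- one step of A's grouping loop, named for the induction
def pvStep (d : PySem.Dict String (List String)) (path : String) : PySem.Dict String (List String) :=
  let name := pvName path
  let d := if d.contains name then d else d.insert name ([] : List String)
  d.modify name [] (· ++ [path])

lemma pvStep_getD (d : PySem.Dict String (List String)) (path q : String) :
    (pvStep d path).getD q [] = d.getD q [] ++ (if pvName path == q then [path] else []) := by
  unfold pvStep
  by_cases h : q = pvName path
  · by_cases hc : d.contains (pvName path)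
    · simp [h, hc]
    · have hc' : d.contains (pvName path) = false := by simpa using hc
      simp [h, hc', PySem.Dict.getD_of_not_contains d [] hc']
  · have h' : ¬ pvName path = q := fun hh => h hh.symm
    by_cases hc : d.contains (pvName path)
    · simp [hc, PySem.Dict.getD_modify, h, h', beq_iff_eq]
    · simp [hc, PySem.Dict.getD_modify, PySem.Dict.getD_insert, h, h', beq_iff_eq]

lemma pvStep_contains (d : PySem.Dict String (List String)) (path q : String) :
    (pvStep d path).contains q = (d.contains q || (pvName path == q)) := by
  unfold pvStep
  by_cases h : q = pvName path
  · by_cases hc : d.contains (pvName path) <;>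
      simp [h, hc, PySem.Dict.contains_modify]
  · have e1 : (q == pvName path) = false := by simp [h]
    have e2 : (pvName path == q) = false := by simp [Ne.symm h]
    by_cases hc : d.contains (pvName path) <;>
      simp [hc, PySem.Dict.contains_modify, PySem.Dict.contains_insert, e1, e2]

lemma pvBuild_getD (files : List String) (d : PySem.Dict String (List String)) (q : String) :
    (files.foldl pvStep d).getD q [] = d.getD q [] ++ files.filter (fun p => pvName p == q) := by
  induction files generalizing d with
  | nil => simp
  | cons p rest ih =>
      simp only [List.foldl_cons, ih, pvStep_getD, List.filter_cons]
      by_cases h : pvName p == q <;> simp [h]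

lemma pvBuild_contains (files : List String) (d : PySem.Dict String (List String)) (q : String) :
    (files.foldl pvStep d).contains q = (d.contains q || files.any (fun p => pvName p == q)) := by
  induction files generalizing d with
  | nil => simp
  | cons p rest ih =>
      simp only [List.foldl_cons, ih, pvStep_contains, List.any_cons]
      by_cases h : pvName p == q <;> by_cases hd : d.contains q <;> simp [h, hd]

lemma pvAlt_group (files : List String) (q : String) :
    ((files.map (fun path => (pvName path, path))).filter (fun np => np.1 == q)).map
        (fun np => np.2) =
      files.filter (fun p => pvName p == q) := by
  induction files with
  | nil => rfl
  | cons p rest ih =>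
      simp only [List.map_cons, List.filter_cons]
      by_cases h : pvName p == q <;> simp [h, ih]

lemma pvQueries_eq (files queries : List String) (acc : List String) :
    queries.foldl (fun result query =>
        if (files.foldl pvStep PySem.Dict.empty).contains query then
          result ++ (files.foldl pvStep PySem.Dict.empty).getD query [] else result) acc =
    acc ++ queries.flatMap (fun query =>
        ((files.map (fun path => (pvName path, path))).filter (fun np => np.1 == query)).map
          (fun np => np.2)) := by
  induction queries generalizing acc with
  | nil => simp
  | cons q rest ih =>
      simp only [List.foldl_cons, List.flatMap_cons, ih, pvAlt_group]
      rw [pvBuild_getD, pvBuild_contains]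
      simp only [PySem.Dict.getD_empty, PySem.Dict.contains_empty, Bool.false_or,
        List.nil_append]
      by_cases h : files.any (fun p => pvName p == q)
      · simp [h]
      · have : files.filter (fun p => pvName p == q) = [] := by
          simpa [List.filter_eq_nil_iff] using by simpa [List.any_eq_true] using h
        simp [h, this]

-- ===== VERDICT (by name: the statement is the Claim_ definition above) =====
theorem finder_spec : Claim_equal_finder := by
  intro files queries _
  unfold Spec_finder finder finder_alt
  simpa using pvQueries_eq files queries []
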